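-- pv_equiv track=rewrite | github.com/salitahir/doc_flow | extractor/utils/outline.py | label_for_page
-- ===== SOURCE A (Python) =====
-- from typing import List, Tuple
--
-- def label_for_page(ranges: List[Tuple[int, str, int, int]], page_no: int) -> Tuple[str, str, str]:
--     """
--     For a given page_no (1-based), return best (h1,h2,h3) derived from outline levels.
--     """
--     # collect all outline entries covering this page
--     covers = [(lvl, title) for (lvl, title, s, e) in ranges if s <= page_no <= e]
--     # Keep top 3 levels
--     h1 = h2 = h3 = ""
--     for lvl, title in sorted(covers, key=lambda x: x[0]):
--         if lvl == 1 and not h1: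
--             h1 = title
--         elif lvl == 2 and not h2:
--             h2 = title
--         elif lvl >= 3 and not h3:
--             h3 = title
--     return h1, h2, h3
-- ===== SOURCE B (Python) =====
-- def label_for_page(ranges, page_no):
--     """
--     For a given page_no (1-based), return best (h1,h2,h3) derived from outline levels.
--     Single pass, no sort: first nonempty title per level for h1/h2; for h3 track the
--     smallest level >= 3 seen so far and keep the earliest nonempty title at it.
--     """
--     h1 = h2 = h3 = ""
--     best3 = None
--     for lvl, title, s, e in ranges:
--         if not (s <= page_no <= e) or not title:
--             continue
--         if lvl == 1:
--             if not h1: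
--                 h1 = title
--         elif lvl == 2:
--             if not h2:
--                 h2 = title
--         elif lvl >= 3 and (best3 is None or lvl < best3):
--             best3 = lvl
--             h3 = title
--     return h1, h2, h3
-- ===== Notes on version B (the rewrite author's own statement) =====
-- stated objective: faster
-- what changed: Replaces build-list + stable sort + sorted scan by a single unsorted pass that keeps first-nonempty titles for levels 1 and 2 and min-level tracking (strict <, earliest tie) for levels >= 3.
import Mathlib
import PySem

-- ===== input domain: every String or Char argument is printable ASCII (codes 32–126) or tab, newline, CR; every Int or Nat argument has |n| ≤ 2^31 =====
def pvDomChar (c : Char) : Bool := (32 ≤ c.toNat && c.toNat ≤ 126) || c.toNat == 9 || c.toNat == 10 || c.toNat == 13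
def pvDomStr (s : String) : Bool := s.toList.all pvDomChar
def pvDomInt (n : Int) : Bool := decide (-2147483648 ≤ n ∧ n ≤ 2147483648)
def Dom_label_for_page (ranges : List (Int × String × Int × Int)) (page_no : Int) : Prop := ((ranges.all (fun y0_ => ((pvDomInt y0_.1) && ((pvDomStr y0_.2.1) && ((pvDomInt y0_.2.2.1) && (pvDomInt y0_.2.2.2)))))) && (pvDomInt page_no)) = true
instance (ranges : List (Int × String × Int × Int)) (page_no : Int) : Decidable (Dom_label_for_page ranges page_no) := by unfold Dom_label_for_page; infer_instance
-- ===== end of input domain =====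

-- B replaces A's build-list + stable sort + scan by one unsorted pass (first-nonempty per level, min-level tracking for >=3); proved equal on all inputs.


-- ===== PORT A =====
-- covers = [(lvl, title) for (lvl, title, s, e) in ranges if s <= page_no <= e]
def pvCovers (ranges : List (Int × String × Int × Int)) (page_no : Int) : List (Int × String) :=
  ranges.filterMap (fun r => if r.2.2.1 ≤ page_no ∧ page_no ≤ r.2.2.2 then some (r.1, r.2.1) else none)

-- the body of A's loop ('not h' on a Python str is 'h = ""')
def pvStepA (h : String × String × String) (c : Int × String) : String × String × String :=
  if c.1 = 1 ∧ h.1 = "" then (c.2, h.2.1, h.2.2)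
  else if c.1 = 2 ∧ h.2.1 = "" then (h.1, c.2, h.2.2)
  else if 3 ≤ c.1 ∧ h.2.2 = "" then (h.1, h.2.1, c.2)
  else h

def label_for_page (ranges : List (Int × String × Int × Int)) (page_no : Int) : String × String × String :=
  (PySem.List.sorted (pvCovers ranges page_no) (fun x => x.1) false).foldl pvStepA ("", "", "")

-- ===== PORT B =====
-- the body of B's loop; state = (h1, h2, h3, best3)
def pvStepB (page_no : Int) (st : String × String × String × Option Int)
    (r : Int × String × Int × Int) : String × String × String × Option Int :=
  if ¬ (r.2.2.1 ≤ page_no ∧ page_no ≤ r.2.2.2) ∨ r.2.1 = "" then st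
  else if r.1 = 1 then (if st.1 = "" then (r.2.1, st.2.1, st.2.2.1, st.2.2.2) else st)
  else if r.1 = 2 then (if st.2.1 = "" then (st.1, r.2.1, st.2.2.1, st.2.2.2) else st)
  else if 3 ≤ r.1 then
    match st.2.2.2 with
    | none => (st.1, st.2.1, r.2.1, some r.1)
    | some b => if r.1 < b then (st.1, st.2.1, r.2.1, some r.1) else st
  else st

def label_for_page_alt (ranges : List (Int × String × Int × Int)) (page_no : Int) : String × String × String :=
  let st := ranges.foldl (pvStepB page_no) ("", "", "", none)
  (st.1, st.2.1, st.2.2.1)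

-- ===== PRECONDITION & SPEC =====
def Spec_label_for_page (ranges : List (Int × String × Int × Int)) (page_no : Int) (out : String × String × String) : Prop := out = label_for_page_alt ranges page_no
instance (ranges : List (Int × String × Int × Int)) (page_no : Int) (out : String × String × String) : Decidable (Spec_label_for_page ranges page_no out) := by unfold Spec_label_for_page; infer_instance

-- ===== CLAIM (what is proved, stated in full; the proofs are below) =====
def Claim_equal_label_for_page : Prop := ∀ (ranges : List (Int × String × Int × Int)) (page_no : Int), Dom_label_for_page ranges page_no → Spec_label_for_page ranges page_no (label_for_page ranges page_no)

-- ===== LEMMAS AND PROOFS =====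

-- predicates on (lvl, title) pairs: the entries that can fill h1 / h2 / h3
def pvP1 (c : Int × String) : Bool := decide (c.1 = 1) && decide (c.2 ≠ "")
def pvP2 (c : Int × String) : Bool := decide (c.1 = 2) && decide (c.2 ≠ "")
def pvP3 (c : Int × String) : Bool := decide (3 ≤ c.1) && decide (c.2 ≠ "")

-- first element of minimal level (earliest at ties, strict <)
def pvMinF (l : List (Int × String)) : Option (Int × String) :=
  l.foldl (fun acc x => match acc with
    | none => some x
    | some y => if x.1 < y.1 then some x else some y) none

-- the title of an optional entry, "" if none
def pvTitleD (o : Option (Int × String)) : String := (o.map (·.2)).getD ""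

-- B's loop body with the cover/nonempty guard already applied (acts on (lvl, title))
def pvStepB' (st : String × String × String × Option Int) (c : Int × String) :
    String × String × String × Option Int :=
  if c.1 = 1 then (if st.1 = "" then (c.2, st.2.1, st.2.2.1, st.2.2.2) else st)
  else if c.1 = 2 then (if st.2.1 = "" then (st.1, c.2, st.2.2.1, st.2.2.2) else st)
  else if 3 ≤ c.1 then
    match st.2.2.2 with
    | none => (st.1, st.2.1, c.2, some c.1)
    | some b => if c.1 < b then (st.1, st.2.1, c.2, some c.1) else st
  else st

-- B's (h3, best3) sub-scan
def pvScan (p : String × Option Int) (c : Int × String) : String × Option Int :=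
  match p.2 with
  | none => (c.2, some c.1)
  | some b => if c.1 < b then (c.2, some c.1) else p

-- ---- generic facts about the stable insertion sort ----

theorem pv_insert_front (x : Int × String) (l : List (Int × String))
    (h : ∀ z ∈ l, x.1 < z.1) :
    PySem.List.insertBy (fun a b => decide (a.1 < b.1)) x l = x :: l := by
  cases l with
  | nil => simp [PySem.List.insertBy]
  | cons y t => simp [PySem.List.insertBy, h y (by simp)]

theorem pv_filter_insertBy (p : Int × String → Bool) (x : Int × String)
    (l : List (Int × String)) (hl : l.Pairwise (fun a b => a.1 ≤ b.1)) :
    (PySem.List.insertBy (fun a b => decide (a.1 < b.1)) x l).filter p =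
      if p x then PySem.List.insertBy (fun a b => decide (a.1 < b.1)) x (l.filter p)
      else l.filter p := by
  induction l with
  | nil => by_cases hp : p x <;> simp [PySem.List.insertBy, hp]
  | cons y t ih =>
    rcases List.pairwise_cons.mp hl with ⟨hy, ht⟩
    by_cases hb : x.1 < y.1
    · -- x goes in front of y, hence in front of every kept element of y :: t
      have hfront : ∀ z ∈ (y :: t).filter p, x.1 < z.1 := by
        intro z hz
        have hz' := List.mem_of_mem_filter hz
        rcases List.mem_cons.mp hz' with h | h
        · exact h.symm ▸ hb
        · exact lt_of_lt_of_le hb (hy z h)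
      have hins : PySem.List.insertBy (fun a b => decide (a.1 < b.1)) x (y :: t)
          = x :: y :: t := by simp [PySem.List.insertBy, hb]
      rw [hins]
      by_cases hp : p x
      · rw [pv_insert_front x _ hfront]
        simp [List.filter_cons, hp]
      · simp [List.filter_cons, hp]
    · have hins : PySem.List.insertBy (fun a b => decide (a.1 < b.1)) x (y :: t)
          = y :: PySem.List.insertBy (fun a b => decide (a.1 < b.1)) x t := by
        simp [PySem.List.insertBy, hb]
      rw [hins]
      simp only [List.filter_cons]
      rw [ih ht]
      by_cases hpy : p y <;> by_cases hp : p x <;>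
        simp [hpy, hp, List.filter_cons, PySem.List.insertBy, hb]

theorem pv_filter_sorted (p : Int × String → Bool) (xs : List (Int × String)) :
    (PySem.List.sorted xs (fun c => c.1) false).filter p =
      PySem.List.sorted (xs.filter p) (fun c => c.1) false := by
  induction xs using List.reverseRecOn with
  | nil => simp [PySem.List.sorted]
  | append_singleton l x ih =>
    rw [PySem.List.sorted_eq_foldl_insertBy] at ih ⊢
    rw [List.foldl_append]
    simp only [List.foldl_cons, List.foldl_nil]
    have hpw : (List.foldl (fun acc x =>
        PySem.List.insertBy (fun a b => decide (a.1 < b.1)) x acc) [] l).Pairwise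
        (fun a b => a.1 ≤ b.1) := by
      have := PySem.List.sorted_pairwise l (fun c : Int × String => c.1)
      rwa [PySem.List.sorted_eq_foldl_insertBy] at this
    rw [pv_filter_insertBy p x _ hpw, ih]
    by_cases hp : p x <;>
      simp [hp, List.filter_append, List.foldl_append, PySem.List.sorted_eq_foldl_insertBy]

theorem pv_head_sorted (l : List (Int × String)) :
    (PySem.List.sorted l (fun c => c.1) false).head? = pvMinF l := by
  induction l using List.reverseRecOn with
  | nil => simp [PySem.List.sorted, pvMinF]
  | append_singleton t x ih =>
    rw [PySem.List.sorted_eq_foldl_insertBy, List.foldl_append] at *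
    simp only [List.foldl_cons, List.foldl_nil]
    unfold pvMinF at *
    rw [List.foldl_append]
    simp only [List.foldl_cons, List.foldl_nil]
    rw [← ih]
    cases hs : (List.foldl (fun acc x =>
        PySem.List.insertBy (fun a b => decide (a.1 < b.1)) x acc) [] t) with
    | nil => simp [PySem.List.insertBy]
    | cons y ys =>
      by_cases hb : x.1 < y.1 <;> simp [PySem.List.insertBy, hb]

-- ---- characterisation of A's fold over any list ----

theorem pv_foldA_char (l : List (Int × String)) (a b c : String) :
    l.foldl pvStepA (a, b, c) =
      (if a = "" then pvTitleD (l.filter pvP1).head? else a,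
       if b = "" then pvTitleD (l.filter pvP2).head? else b,
       if c = "" then pvTitleD (l.filter pvP3).head? else c) := by
  induction l generalizing a b c with
  | nil => simp [pvTitleD]
  | cons x t ih =>
    simp only [List.foldl_cons]
    by_cases h1 : x.1 = 1
    · by_cases he : x.2 = ""
      · have hst : pvStepA (a, b, c) x = (a, b, c) := by
          rcases eq_or_ne a "" with hA | hA <;> simp [pvStepA, h1, he, hA]
        rw [hst, ih]
        simp [pvP1, pvP2, pvP3, h1, he]
      · by_cases hA : a = ""
        · rw [show pvStepA (a, b, c) x = (x.2, b, c) by simp [pvStepA, h1, hA], ih]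
          simp [pvP1, pvP2, pvP3, h1, he, hA, pvTitleD]
        · rw [show pvStepA (a, b, c) x = (a, b, c) by simp [pvStepA, h1, hA], ih]
          simp [pvP1, pvP2, pvP3, h1, hA]
    · by_cases h2 : x.1 = 2
      · by_cases he : x.2 = ""
        · have hst : pvStepA (a, b, c) x = (a, b, c) := by
            rcases eq_or_ne b "" with hB | hB <;> simp [pvStepA, h1, h2, he, hB]
          rw [hst, ih]
          simp [pvP1, pvP2, pvP3, h1, h2, he]
        · by_cases hB : b = ""
          · rw [show pvStepA (a, b, c) x = (a, x.2, c) by simp [pvStepA, h1, h2, hB], ih]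
            simp [pvP1, pvP2, pvP3, h1, h2, he, hB, pvTitleD]
          · rw [show pvStepA (a, b, c) x = (a, b, c) by simp [pvStepA, h1, h2, hB], ih]
            simp [pvP1, pvP2, pvP3, h1, h2, hB]
      · by_cases h3 : 3 ≤ x.1
        · by_cases he : x.2 = ""
          · have hst : pvStepA (a, b, c) x = (a, b, c) := by
              rcases eq_or_ne c "" with hC | hC <;> simp [pvStepA, h1, h2, h3, he, hC]
            rw [hst, ih]
            simp [pvP1, pvP2, pvP3, h1, h2, h3, he]
          · by_cases hC : c = ""
            · rw [show pvStepA (a, b, c) x = (a, b, x.2) by simp [pvStepA, h1, h2, h3, hC], ih]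
              simp [pvP1, pvP2, pvP3, h1, h2, h3, he, hC, pvTitleD]
            · rw [show pvStepA (a, b, c) x = (a, b, c) by simp [pvStepA, h1, h2, h3, hC], ih]
              simp [pvP1, pvP2, pvP3, h1, h2, h3, hC]
        · rw [show pvStepA (a, b, c) x = (a, b, c) by simp [pvStepA, h1, h2, h3], ih]
          simp [pvP1, pvP2, pvP3, h1, h2, h3]

-- ---- B's fold over ranges = guard-free fold over the nonempty-title covers ----

theorem pv_foldB_guard (ranges : List (Int × String × Int × Int)) (page_no : Int)
    (st : String × String × String × Option Int) :
    ranges.foldl (pvStepB page_no) st =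
      ((pvCovers ranges page_no).filter (fun c => c.2 ≠ "")).foldl pvStepB' st := by
  induction ranges generalizing st with
  | nil => simp [pvCovers]
  | cons r t ih =>
    simp only [List.foldl_cons]
    by_cases hc : r.2.2.1 ≤ page_no ∧ page_no ≤ r.2.2.2
    · by_cases he : r.2.1 = ""
      · rw [show pvStepB page_no st r = st from by simp [pvStepB, he], ih]
        simp [pvCovers, List.filterMap_cons, List.filter_cons, hc, he]
      · rw [show pvStepB page_no st r = pvStepB' st (r.1, r.2.1) from by
            simp [pvStepB, pvStepB', hc, he], ih]
        simp [pvCovers, List.filterMap_cons, List.filter_cons, hc, he]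
    · rw [show pvStepB page_no st r = st from by simp [pvStepB, hc], ih]
      simp [pvCovers, List.filterMap_cons, hc]

-- ---- characterisation of B's guard-free fold ----

theorem pv_scan_char (m : List (Int × String)) (acc : Option (Int × String)) :
    m.foldl pvScan (pvTitleD acc, acc.map (·.1)) =
      (pvTitleD (m.foldl (fun acc x => match acc with
        | none => some x
        | some y => if x.1 < y.1 then some x else some y) acc),
       (m.foldl (fun acc x => match acc with
        | none => some x
        | some y => if x.1 < y.1 then some x else some y) acc).map (·.1)) := by
  induction m generalizing acc with
  | nil => rfl
  | cons x t ih =>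
    simp only [List.foldl_cons]
    cases acc with
    | none => exact ih (some x)
    | some y =>
      by_cases hb : x.1 < y.1
      · simpa [pvScan, pvTitleD, hb] using ih (some x)
      · simpa [pvScan, pvTitleD, hb] using ih (some y)

theorem pv_scan_none (m : List (Int × String)) :
    m.foldl pvScan ("", none) = (pvTitleD (pvMinF m), (pvMinF m).map (·.1)) :=
  pv_scan_char m none

theorem pv_foldB'_char (m : List (Int × String)) (hm : ∀ c ∈ m, c.2 ≠ "")
    (a b : String) (p : String × Option Int) :
    m.foldl pvStepB' (a, b, p) =
      (if a = "" then pvTitleD (m.filter (fun c => decide (c.1 = 1))).head? else a,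
       if b = "" then pvTitleD (m.filter (fun c => decide (c.1 = 2))).head? else b,
       (m.filter (fun c => decide (3 ≤ c.1))).foldl pvScan p) := by
  induction m generalizing a b p with
  | nil => simp [pvTitleD]
  | cons x t ih =>
    have hm' : ∀ c ∈ t, c.2 ≠ "" := fun c hc => hm c (List.mem_cons_of_mem _ hc)
    have hx : x.2 ≠ "" := hm x (by simp)
    simp only [List.foldl_cons]
    by_cases h1 : x.1 = 1
    · by_cases hA : a = ""
      · rw [show pvStepB' (a, b, p) x = (x.2, b, p) by simp [pvStepB', h1, hA],
            ih hm']
        simp [h1, hA, hx, pvTitleD]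
      · rw [show pvStepB' (a, b, p) x = (a, b, p) by simp [pvStepB', h1, hA],
            ih hm']
        simp [h1, hA]
    · by_cases h2 : x.1 = 2
      · by_cases hB : b = ""
        · rw [show pvStepB' (a, b, p) x = (a, x.2, p) by simp [pvStepB', h1, h2, hB],
              ih hm']
          simp [h1, h2, hB, hx, pvTitleD]
        · rw [show pvStepB' (a, b, p) x = (a, b, p) by simp [pvStepB', h1, h2, hB],
              ih hm']
          simp [h1, h2, hB]
      · by_cases h3 : 3 ≤ x.1
        · have hst : pvStepB' (a, b, p) x = (a, b, pvScan p x) := by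
            rcases p with ⟨s, bo⟩
            cases bo with
            | none => simp [pvStepB', pvScan, h1, h2, h3]
            | some v => by_cases hlt : x.1 < v <;> simp [pvStepB', pvScan, h1, h2, h3, hlt]
          rw [hst, ih hm']
          simp [h1, h2, h3]
        · rw [show pvStepB' (a, b, p) x = (a, b, p) by simp [pvStepB', h1, h2, h3],
              ih hm']
          simp [h1, h2, h3]

-- level-1 (resp. level-2) covers all share one level, so they are already sorted
theorem pv_sorted_const (xs : List (Int × String)) (k : Int) (p : Int × String → Bool)
    (hk : ∀ c, p c = true → c.1 = k) :
    PySem.List.sorted (xs.filter p) (fun c => c.1) false = xs.filter p := by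
  apply PySem.List.sorted_eq_self_of_pairwise
  apply List.pairwise_of_forall_mem_list
  intro a ha b hb
  have ha' := hk a (List.of_mem_filter ha)
  have hb' := hk b (List.of_mem_filter hb)
  omega

-- ===== VERDICT (by name: the statement is the Claim_ definition above) =====
theorem label_for_page_spec : Claim_equal_label_for_page := by
  intro ranges page_no _
  unfold Spec_label_for_page
  have hk1 : ∀ c, pvP1 c = true → c.1 = 1 := by
    intro c hc; simp [pvP1] at hc; exact hc.1
  have hk2 : ∀ c, pvP2 c = true → c.1 = 2 := by
    intro c hc; simp [pvP2] at hc; exact hc.1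
  have hA : label_for_page ranges page_no =
      (pvTitleD ((pvCovers ranges page_no).filter pvP1).head?,
       pvTitleD ((pvCovers ranges page_no).filter pvP2).head?,
       pvTitleD (pvMinF ((pvCovers ranges page_no).filter pvP3))) := by
    unfold label_for_page
    rw [pv_foldA_char]
    rw [pv_filter_sorted pvP1, pv_filter_sorted pvP2, pv_filter_sorted pvP3]
    rw [pv_sorted_const _ 1 pvP1 hk1, pv_sorted_const _ 2 pvP2 hk2]
    rw [pv_head_sorted]
    simp
  have hm : ∀ c ∈ (pvCovers ranges page_no).filter (fun c => c.2 ≠ ""), c.2 ≠ "" := by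
    intro c hc
    exact of_decide_eq_true (List.mem_filter.mp hc).2
  have hf1 : ((pvCovers ranges page_no).filter (fun c => c.2 ≠ "")).filter
      (fun c => decide (c.1 = 1)) = (pvCovers ranges page_no).filter pvP1 := by
    rw [List.filter_filter]
    apply List.filter_congr
    intro c _
    simp [pvP1]
  have hf2 : ((pvCovers ranges page_no).filter (fun c => c.2 ≠ "")).filter
      (fun c => decide (c.1 = 2)) = (pvCovers ranges page_no).filter pvP2 := by
    rw [List.filter_filter]
    apply List.filter_congr
    intro c _
    simp [pvP2]
  have hf3 : ((pvCovers ranges page_no).filter (fun c => c.2 ≠ "")).filter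
      (fun c => decide (3 ≤ c.1)) = (pvCovers ranges page_no).filter pvP3 := by
    rw [List.filter_filter]
    apply List.filter_congr
    intro c _
    simp [pvP3]
  have hB : label_for_page_alt ranges page_no =
      (pvTitleD ((pvCovers ranges page_no).filter pvP1).head?,
       pvTitleD ((pvCovers ranges page_no).filter pvP2).head?,
       pvTitleD (pvMinF ((pvCovers ranges page_no).filter pvP3))) := by
    unfold label_for_page_alt
    rw [pv_foldB_guard]
    rw [pv_foldB'_char _ hm "" "" (("", none) : String × Option Int)]
    rw [hf1, hf2, hf3, pv_scan_none]
    simp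
  exact hA.trans hB.symm
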